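-- pv_equiv track=rewrite | github.com/kin9-0rz/apkutils | apkutils/intersection.py | gen_words
-- ===== SOURCE A (Python) =====
-- def gen_words(s):
--     words = set()
--     size = len(s)
--
--     for offset in range(1, size+1):
--         for i in range(0, size+1-offset):
--             word = '.'.join(s[i:i+offset])
--             start = ''
--             end = ''
--             if i > 0:
--                 start = '*.'
--             if size - offset > i:
--                 end = '.*'
--             words.add(start + word + end)
--     return words
-- ===== SOURCE B (Python) =====
-- def gen_words(s):
--     # Build the rows of dot-joined substrings recursively: each next row is the
--     # previous row zipped with the shifted tail (one concatenation per word);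
--     # collect all marked words in one flat list and deduplicate once at the end.
--     out = []
--     row = list(s)
--     tail = s
--     while row:
--         last = len(row) - 1
--         for k, w in enumerate(row):
--             out.append(('*.' if k > 0 else '') + w + ('.*' if k < last else ''))
--         tail = tail[1:]
--         row = [w + '.' + t for w, t in zip(row, tail)]
--     return set(out)
-- ===== Notes on version B (the rewrite author's own statement) =====
-- stated objective: alternative
-- what changed: B replaces A's nested range loops with set.add by a recursive row construction (each generation of dot-joins obtained by zipping the previous row with the shifted tail, one concatenation per word), collecting all marked words into one flat list and deduplicating once with set() at the end.
import Mathlib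
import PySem

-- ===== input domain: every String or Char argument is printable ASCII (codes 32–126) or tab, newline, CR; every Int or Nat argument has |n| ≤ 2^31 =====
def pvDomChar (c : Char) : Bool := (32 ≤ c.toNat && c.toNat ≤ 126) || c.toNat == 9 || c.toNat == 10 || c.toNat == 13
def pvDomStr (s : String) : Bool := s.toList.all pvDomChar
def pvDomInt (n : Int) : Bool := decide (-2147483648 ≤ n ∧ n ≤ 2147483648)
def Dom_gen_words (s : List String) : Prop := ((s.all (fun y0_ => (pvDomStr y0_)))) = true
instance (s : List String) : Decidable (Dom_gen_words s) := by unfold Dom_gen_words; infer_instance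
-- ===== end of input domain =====

-- B builds the rows of dot-joined substrings recursively (each row = previous row
-- zipped with the shifted tail, one concatenation per word), collects all marked words
-- in one flat list and deduplicates once at the end (objective: alternative decomposition).


-- ===== PORT A =====
def gen_words (s : List String) : List String :=
  let size : Int := (s.length : Int)
  (PySem.List.pyRange 1 (size + 1) 1).foldl (fun words offset =>
    (PySem.List.pyRange 0 (size + 1 - offset) 1).foldl (fun words i =>
      let word := PySem.Str.join "." (PySem.List.slice s (some i) (some (i + offset)))
      let start := if i > 0 then "*." else ""
      let stop := if size - offset > i then ".*" else ""
      PySem.Set.add words (start ++ word ++ stop)) words) PySem.Set.empty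

-- ===== PORT B =====
-- 'for k, w in enumerate(row): out.append(…)' for one row
def genMarkRow (row : List String) : List String :=
  (PySem.List.enumerate row 0).map (fun p =>
    (if p.1 > 0 then "*." else "") ++ p.2 ++
      (if p.1 < (row.length : Int) - 1 then ".*" else ""))

-- the 'while row:' loop of Source B: state (row, tail, out)
def genLoop (row tail out : List String) : List String :=
  match row with
  | [] => out
  | x :: rs =>
    let tail' := PySem.List.slice tail (some 1) none
    let row' := ((x :: rs).zip tail').map (fun p => p.1 ++ "." ++ p.2)
    genLoop row' tail' (out ++ genMarkRow (x :: rs))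
termination_by row.length + tail.length
decreasing_by
  simp [PySem.List.slice_from_one, List.length_zip]
  omega

def gen_words_alt (s : List String) : List String :=
  PySem.Set.ofList (genLoop s s [])

-- ===== PRECONDITION & SPEC =====
def Spec_gen_words (s : List String) (out : List String) : Prop := out = gen_words_alt s
instance (s : List String) (out : List String) : Decidable (Spec_gen_words s out) := by unfold Spec_gen_words; infer_instance

-- ===== CLAIM (what is proved, stated in full; the proofs are below) =====
def Claim_equal_gen_words : Prop := ∀ (s : List String), Dom_gen_words s → Spec_gen_words s (gen_words s)

-- ===== LEMMAS AND PROOFS =====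

-- the joined word A computes for start index i and length o
def wordW (s : List String) (o i : Int) : String :=
  PySem.Str.join "." (PySem.List.slice s (some i) (some (i + o)))

-- the row of all (unmarked) words of length o
def rowW (s : List String) (o : Nat) : List String :=
  (PySem.List.pyRange 0 ((s.length : Int) + 1 - o) 1).map (fun i => wordW s o i)

-- the row of all marked words of length o, in A's insertion order
def markA (s : List String) (o : Int) : List String :=
  (PySem.List.pyRange 0 ((s.length : Int) + 1 - o) 1).map (fun i =>
    (if i > 0 then "*." else "") ++ wordW s o i ++
      (if (s.length : Int) - o > i then ".*" else ""))

theorem chars_join_append (sep : List Char) (l : List (List Char)) (x : List Char)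
    (h : l ≠ []) :
    PySem.Chars.join sep (l ++ [x]) = PySem.Chars.join sep l ++ sep ++ x := by
  induction l with
  | nil => exact absurd rfl h
  | cons a l ih =>
    cases l with
    | nil => simp [PySem.Chars.join_cons_cons, PySem.Chars.join_singleton]
    | cons b l =>
      simp only [List.cons_append] at ih ⊢
      rw [PySem.Chars.join_cons_cons, PySem.Chars.join_cons_cons, ih (by simp)]
      simp [List.append_assoc]

theorem str_join_append (l : List String) (x : String) (h : l ≠ []) :
    PySem.Str.join "." (l ++ [x]) = PySem.Str.join "." l ++ "." ++ x := by
  apply String.toList_inj.mp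
  simp only [PySem.Str.toList_join, String.toList_append, List.map_append, List.map_cons,
    List.map_nil]
  exact chars_join_append _ _ _ (by simpa using h)

theorem str_join_singleton (x : String) : PySem.Str.join "." [x] = x := by
  apply String.toList_inj.mp
  simp [PySem.Str.toList_join, PySem.Chars.join_singleton]

theorem word_one (s : List String) (i : Nat) (hi : i < s.length) :
    wordW s 1 i = PySem.List.pyGetD s i "" := by
  unfold wordW
  have h1 : ((i : Int) + 1) = ((i + 1 : Nat) : Int) := by push_cast; ring
  rw [h1, PySem.List.slice_natCast, PySem.List.pyGetD_natCast]
  have h2 : i + 1 - i = 1 := by omega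
  rw [h2, List.drop_eq_getElem_cons hi, List.take_succ_cons, List.take_zero,
    str_join_singleton, List.getD_eq_getElem s "" hi]

theorem word_step (s : List String) (o i : Nat) (ho : 1 ≤ o) (h : i + o < s.length) :
    wordW s (o + 1) i = wordW s o i ++ "." ++ s[i + o] := by
  unfold wordW
  have h1 : ((i : Int) + ((o : Int) + 1)) = ((i + (o + 1) : Nat) : Int) := by push_cast; ring
  have h2 : ((i : Int) + (o : Nat)) = ((i + o : Nat) : Int) := by push_cast; ring
  rw [h1, h2, PySem.List.slice_natCast, PySem.List.slice_natCast]
  have h3 : i + (o + 1) - i = o + 1 := by omega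
  have h4 : i + o - i = o := by omega
  rw [h3, h4, List.take_add_one]
  have h5 : (List.drop i s)[o]? = some s[i + o] := by
    rw [List.getElem?_drop]
    exact List.getElem?_eq_getElem (by omega)
  have h7 : (some s[i + o]).toList = [s[i + o]] := rfl
  rw [h5, h7]
  have h6 : List.take o (List.drop i s) ≠ [] := by
    have hlen : (List.take o (List.drop i s)).length = min o (s.length - i) := by simp
    intro hc
    rw [hc] at hlen
    simp at hlen
    omega
  rw [str_join_append _ _ h6]

theorem row_one (s : List String) : rowW s 1 = s := by
  unfold rowW
  have h : ((s.length : Int) + 1 - ((1 : Nat) : Int)) = (s.length : Int) := by push_cast; ring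
  rw [h]
  have h2 : ∀ i ∈ PySem.List.pyRange 0 (s.length : Int) 1,
      wordW s ((1 : Nat) : Int) i = PySem.List.pyGetD s i "" := by
    intro i hi
    rw [PySem.List.mem_pyRange_one] at hi
    have hit : i = ((i.toNat : Nat) : Int) := by omega
    rw [hit, Nat.cast_one]
    exact word_one s i.toNat (by omega)
  rw [List.map_congr_left h2]
  exact PySem.List.map_pyGetD_pyRange_zero' s ""

theorem length_rowW (s : List String) (o : Nat) :
    (rowW s o).length = s.length + 1 - o := by
  unfold rowW
  rw [List.length_map, PySem.List.length_pyRange_one]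
  omega

theorem enum_map {α β : Type} (l : List α) (f : α → β) (k : Int) :
    PySem.List.enumerate (l.map f) k = (PySem.List.enumerate l k).map (fun p => (p.1, f p.2)) := by
  induction l generalizing k with
  | nil => simp [PySem.List.enumerate]
  | cons a l ih => simp [PySem.List.enumerate_cons, ih]

theorem enum_pyRange (a b : Int) :
    PySem.List.enumerate (PySem.List.pyRange a b 1) a
      = (PySem.List.pyRange a b 1).map (fun i => (i, i)) := by
  by_cases hab : b ≤ a
  · rw [PySem.List.pyRange_one_eq_nil hab]; simp [PySem.List.enumerate_nil]
  · rw [not_le] at hab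
    have hn : ∃ n : Nat, b - a = (n : Int) ∧ 0 < n := ⟨(b - a).toNat, by omega, by omega⟩
    obtain ⟨n, hn, hpos⟩ := hn
    clear hab hpos
    induction n generalizing a with
    | zero =>
      rw [PySem.List.pyRange_one_eq_nil (by omega)]; simp [PySem.List.enumerate_nil]
    | succ k ih =>
      by_cases hk : a < b
      · rw [PySem.List.pyRange_one_cons hk, PySem.List.enumerate_cons, List.map_cons,
          ih (a + 1) (by omega)]
      · rw [PySem.List.pyRange_one_eq_nil (by omega)]; simp [PySem.List.enumerate_nil]

-- marking B's row of length-o words gives A's marked row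
theorem mark_rowW (s : List String) (o : Nat) (_ho : 1 ≤ o) (hs : o ≤ s.length + 1) :
    genMarkRow (rowW s o) = markA s o := by
  unfold genMarkRow markA
  rw [length_rowW]
  unfold rowW
  rw [enum_map, enum_pyRange 0 ((s.length : Int) + 1 - o), List.map_map, List.map_map]
  apply List.map_congr_left
  intro i hi
  rw [PySem.List.mem_pyRange_one] at hi
  simp only [Function.comp_apply]
  congr 1
  exact if_congr (by omega) rfl rfl

-- the zip-and-join step turns the row of length o into the row of length o+1
theorem zip_step (s : List String) (o : Nat) (ho : 1 ≤ o) :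
    ((rowW s o).zip (s.drop o)).map (fun p => p.1 ++ "." ++ p.2) = rowW s (o + 1) := by
  apply List.ext_getElem
  · rw [List.length_map, List.length_zip, length_rowW, List.length_drop, length_rowW]
    omega
  · intro k h1 h2
    rw [List.length_map, List.length_zip, length_rowW, List.length_drop] at h1
    simp only [List.getElem_map, List.getElem_zip]
    unfold rowW
    simp only [List.getElem_map, PySem.List.getElem_pyRange_one, List.getElem_drop]
    have hc1 : (0 : Int) + (k : Nat) = ((k : Nat) : Int) := by ring
    rw [hc1]
    have hco : ((o + 1 : Nat) : Int) = ((o : Nat) : Int) + 1 := by push_cast; ring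
    rw [hco]
    have := word_step s o k ho (by omega)
    rw [this]
    congr 2
    omega

-- the loop invariant: at offset o the state is (rowW s o, s.drop (o-1), out)
theorem loop_eq (s : List String) : ∀ (d o : Nat) (out : List String), 1 ≤ o →
    s.length + 1 = o + d →
    genLoop (rowW s o) (s.drop (o - 1)) out
      = out ++ (PySem.List.pyRange o ((s.length : Int) + 1) 1).flatMap (fun off => markA s off) := by
  intro d
  induction d with
  | zero =>
    intro o out ho hlen
    have hr : rowW s o = [] := by
      have := length_rowW s o
      exact List.eq_nil_of_length_eq_zero (by omega)
    rw [hr]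
    have hrg : PySem.List.pyRange (o : Int) ((s.length : Int) + 1) 1 = [] :=
      PySem.List.pyRange_one_eq_nil (by omega)
    rw [hrg, genLoop]
    simp
  | succ d ih =>
    intro o out ho hlen
    have hlt : o ≤ s.length := by omega
    have hne : rowW s o ≠ [] := by
      have := length_rowW s o
      intro hc; rw [hc] at this; simp at this; omega
    obtain ⟨x, rs, hr⟩ := List.exists_cons_of_ne_nil hne
    rw [hr]
    rw [genLoop]
    rw [← hr, PySem.List.slice_from_one]
    have htail : (s.drop (o - 1)).tail = s.drop o := by
      rw [List.tail_drop]
      congr 1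
      omega
    rw [htail, zip_step s o ho, mark_rowW s o ho (by omega)]
    have hdrop : s.drop o = s.drop ((o + 1) - 1) := by congr 1
    rw [hdrop, ih (o + 1) (out ++ markA s o) (by omega) (by omega)]
    have hsplit : PySem.List.pyRange (o : Int) ((s.length : Int) + 1) 1
        = (o : Int) :: PySem.List.pyRange ((o : Int) + 1) ((s.length : Int) + 1) 1 :=
      PySem.List.pyRange_one_cons (by omega)
    rw [hsplit, List.flatMap_cons, List.append_assoc]
    have hc : ((o : Int) + 1) = ((o + 1 : Nat) : Int) := by push_cast; ring
    rw [hc]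

-- folding a flatMap is folding group by group
theorem foldl_flat {α β γ : Type} (l : List α) (g : α → List β) (f : γ → β → γ) (init : γ) :
    (l.flatMap g).foldl f init = l.foldl (fun acc x => (g x).foldl f acc) init := by
  induction l generalizing init with
  | nil => rfl
  | cons a l ih => rw [List.flatMap_cons, List.foldl_append, List.foldl_cons, ih]

-- A's nested folds build exactly set(flat list of marked rows)
theorem a_eq_ofList (s : List String) :
    gen_words s = PySem.Set.ofList
      ((PySem.List.pyRange 1 ((s.length : Int) + 1) 1).flatMap (fun off => markA s off)) := by
  unfold gen_words
  rw [PySem.Set.ofList_eq_foldl, foldl_flat]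
  simp only []
  apply PySem.List.foldl_congr_mem
  intro acc o _
  unfold markA wordW
  rw [List.foldl_map]

-- ===== VERDICT (by name: the statement is the Claim_ definition above) =====
theorem gen_words_spec : Claim_equal_gen_words := by
  intro s _
  unfold Spec_gen_words gen_words_alt
  have h0 : genLoop s s [] = genLoop (rowW s 1) (s.drop (1 - 1)) [] := by
    rw [row_one]
    rfl
  rw [h0, loop_eq s s.length 1 [] (by omega) (by omega), List.nil_append, a_eq_ofList]
  norm_num
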